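-- pv_equiv track=rewrite | github.com/SunwoongH/algorithm | Programmers/PCCP 모의고사 2/신입사원 교육.py | solution
-- ===== SOURCE A (Python) =====
-- import heapq
--
-- def solution(ability, number):
--     heapq.heapify(ability)
--
--     for _ in range(number):
--         num1 = heapq.heappop(ability)
--         num2 = heapq.heappop(ability)
--         heapq.heappush(ability, num1 + num2)
--         heapq.heappush(ability, num1 + num2)
--
--     return sum(ability)
-- ===== SOURCE B (Python) =====
-- # B: keep the pool of abilities as a sorted list instead of a binary heap:
-- # sort once, take the two front elements each round, splice their sum back
-- # in twice at its sorted position.  Return value equals A's; side effects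
-- # differ: A reorders `ability` in place into heap order, B leaves it untouched.
-- def solution(ability, number):
--     xs = sorted(ability)
--     for _ in range(number):
--         s = xs[0] + xs[1]
--         xs = _merge_in(xs[2:], s)
--     return sum(xs)
--
-- def _merge_in(rest, s):
--     # insert s twice into the sorted list `rest`, after any equal elements
--     i = 0
--     while i < len(rest) and rest[i] <= s:
--         i += 1
--     return rest[:i] + [s, s] + rest[i:]
-- ===== Notes on version B (the rewrite author's own statement) =====
-- stated objective: alternative
-- what changed: Replaces the binary heap (heapify/heappop/heappush) by a once-sorted list from which the two front elements are taken each round and the doubled sum is spliced back at its sorted position; B also builds a fresh list instead of mutating the argument (return value is what is claimed equal).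
import Mathlib
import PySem

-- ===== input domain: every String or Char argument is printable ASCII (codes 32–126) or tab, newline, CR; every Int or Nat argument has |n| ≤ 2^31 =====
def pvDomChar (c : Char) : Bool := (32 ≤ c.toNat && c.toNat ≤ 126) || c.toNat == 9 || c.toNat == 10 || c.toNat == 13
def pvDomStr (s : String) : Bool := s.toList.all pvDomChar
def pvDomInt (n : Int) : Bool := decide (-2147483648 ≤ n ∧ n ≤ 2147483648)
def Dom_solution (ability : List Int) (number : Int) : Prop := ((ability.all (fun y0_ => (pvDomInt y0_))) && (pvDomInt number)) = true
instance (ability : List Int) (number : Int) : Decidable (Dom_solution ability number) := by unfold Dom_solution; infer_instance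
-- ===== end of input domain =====

-- B replaces A's binary heap by a once-sorted list spliced back together each round;
-- equality claimed is about the RETURN VALUE (A additionally reorders `ability` in place
-- into heap order, B does not touch it).

-- ===== PORT A =====
-- literal port of CPython's heapq._siftdown (the bubble-up loop)
def siftdownLoop (heap : List Int) (startpos pos : Nat) (newitem : Int) : List Int :=
  if _h : startpos < pos then
    if newitem < heap.getD ((pos - 1) / 2) 0 then
      siftdownLoop (heap.set pos (heap.getD ((pos - 1) / 2) 0)) startpos ((pos - 1) / 2) newitem
    else
      heap.set pos newitem
  else
    heap.set pos newitem
termination_by pos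
decreasing_by omega

-- heapq._siftdown(heap, startpos, pos): newitem = heap[pos], then the loop
def siftdown (heap : List Int) (startpos pos : Nat) : List Int :=
  siftdownLoop heap startpos pos (heap.getD pos 0)

-- literal port of CPython's heapq._siftup (sink to a leaf, then _siftdown back up);
-- the in-loop `if … : childpos = rightpos` becomes the two recursive branches
def siftupLoop (heap : List Int) (startpos pos : Nat) (newitem : Int) : List Int :=
  if _h : 2 * pos + 1 < heap.length then
    if _h2 : 2 * pos + 2 < heap.length ∧ ¬ (heap.getD (2 * pos + 1) 0 < heap.getD (2 * pos + 2) 0) then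
      siftupLoop (heap.set pos (heap.getD (2 * pos + 2) 0)) startpos (2 * pos + 2) newitem
    else
      siftupLoop (heap.set pos (heap.getD (2 * pos + 1) 0)) startpos (2 * pos + 1) newitem
  else
    siftdown (heap.set pos newitem) startpos pos
termination_by heap.length - pos
decreasing_by all_goals simp [List.length_set]; omega

def siftup (heap : List Int) (pos : Nat) : List Int :=
  siftupLoop heap pos pos (heap.getD pos 0)

-- heapq.heappush(heap, item): heap.append(item); _siftdown(heap, 0, len(heap)-1)
def heappush (heap : List Int) (item : Int) : List Int :=
  siftdown (heap ++ [item]) 0 heap.length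

-- heapq.heappop(heap); on [] Python raises IndexError (excluded by Pre_), default (0, [])
def heappop (heap : List Int) : Int × List Int :=
  match heap.getLast? with
  | none => (0, [])
  | some lastelt =>
    let rest := heap.dropLast
    if rest = [] then (lastelt, rest)
    else (rest.getD 0 0, siftup (rest.set 0 lastelt) 0)

-- heapq.heapify(x): for i in reversed(range(n//2)): _siftup(x, i)
def heapifyLoop (x : List Int) (k : Nat) : List Int :=
  match k with
  | 0 => x
  | k + 1 => heapifyLoop (siftup x k) k

def heapify (x : List Int) : List Int := heapifyLoop x (x.length / 2)

-- the `for _ in range(number)` loop of A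
def solLoop (n : Nat) (heap : List Int) : List Int :=
  match n with
  | 0 => heap
  | n + 1 =>
    let p1 := heappop heap
    let p2 := heappop p1.2
    let h3 := heappush p2.2 (p1.1 + p2.1)
    let h4 := heappush h3 (p1.1 + p2.1)
    solLoop n h4

def solution (ability : List Int) (number : Int) : Int :=
  (solLoop number.toNat (heapify ability)).sum

-- ===== PORT B =====
-- the `while i < len(rest) and rest[i] <= s` counter of B's _merge_in
def mergePos (rest : List Int) (s : Int) : Nat :=
  match rest with
  | [] => 0
  | x :: t => if x ≤ s then mergePos t s + 1 else 0

-- B's _merge_in(rest, s) = rest[:i] + [s, s] + rest[i:]  (slices exact: 0 ≤ i ≤ len)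
def mergeIn (rest : List Int) (s : Int) : List Int :=
  rest.take (mergePos rest s) ++ [s, s] ++ rest.drop (mergePos rest s)

-- B's `for _ in range(number)` loop; xs[0]/xs[1] raise on short lists (excluded by Pre_)
def altLoop (n : Nat) (xs : List Int) : List Int :=
  match n with
  | 0 => xs
  | n + 1 =>
    match xs with
    | a :: b :: t => altLoop n (mergeIn t (a + b))
    | _ => xs

def solution_alt (ability : List Int) (number : Int) : Int :=
  (altLoop number.toNat (PySem.List.sorted ability (fun x => x) false)).sum

-- ===== PRECONDITION & SPEC =====
-- Pre_ excludes exactly the inputs where A raises IndexError: a positive number of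
-- merge rounds with fewer than two abilities (the pool size is invariant across rounds).
def Pre_solution (ability : List Int) (number : Int) : Prop :=
  number ≤ 0 ∨ 2 ≤ ability.length
instance (ability : List Int) (number : Int) : Decidable (Pre_solution ability number) := by
  unfold Pre_solution; infer_instance

def pvWitness_solution : List Int × Int := ([1, 2, 3], 2)

def Spec_solution (ability : List Int) (number : Int) (out : Int) : Prop :=
  out = solution_alt ability number
instance (ability : List Int) (number : Int) (out : Int) : Decidable (Spec_solution ability number out) := by
  unfold Spec_solution; infer_instance

-- ===== CLAIM (what is proved, stated in full; the proofs are below) =====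
def Claim_equal_solution : Prop := ∀ (ability : List Int) (number : Int), Dom_solution ability number → Pre_solution ability number → Spec_solution ability number (solution ability number)

-- ===== LEMMAS AND PROOFS =====

-- the binary-heap shape invariant: every non-root element dominates its parent
def IsHeap (l : List Int) : Prop :=
  ∀ i : Nat, 0 < i → i < l.length → l.getD ((i - 1) / 2) 0 ≤ l.getD i 0

-- pos lies in the subtree rooted at start (iterated parent reaches start)
def DescN (start pos : Nat) : Prop := ∃ k, (fun p => (p - 1) / 2)^[k] pos = start

theorem desc_self (p : Nat) : DescN p p := ⟨0, rfl⟩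

theorem desc_ge {s p : Nat} (h : DescN s p) : s ≤ p := by
  obtain ⟨k, hk⟩ := h
  induction k generalizing p with
  | zero => simp at hk; omega
  | succ k ih =>
    rw [Function.iterate_succ_apply] at hk
    have := ih hk
    omega

theorem desc_parent {s p : Nat} (h : DescN s p) (hne : s ≠ p) : DescN s ((p - 1) / 2) := by
  obtain ⟨k, hk⟩ := h
  cases k with
  | zero => simp at hk; omega
  | succ k => exact ⟨k, by rw [Function.iterate_succ_apply] at hk; exact hk⟩

theorem desc_child {s p c : Nat} (h : DescN s p) (hc : (c - 1) / 2 = p) : DescN s c := by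
  obtain ⟨k, hk⟩ := h
  exact ⟨k + 1, by rw [Function.iterate_succ_apply, hc]; exact hk⟩

theorem desc_zero (p : Nat) : DescN 0 p := by
  induction p using Nat.strong_induction_on with
  | _ p ih =>
    cases p with
    | zero => exact desc_self 0
    | succ q =>
      have := ih ((q + 1 - 1) / 2) (by omega)
      exact desc_child this rfl

theorem parent_ge_start {s p : Nat} (h : DescN s p) (hlt : s < p) : s ≤ (p - 1) / 2 :=
  desc_ge (desc_parent h (by omega))

theorem getD_set_self (l : List Int) (i : Nat) (x : Int) (h : i < l.length) :
    (l.set i x).getD i 0 = x := by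
  rw [List.getD_eq_getElem _ _ (by simpa using h)]; simp

theorem getD_set_ne (l : List Int) (i j : Nat) (x : Int) (h : i ≠ j) :
    (l.set i x).getD j 0 = l.getD j 0 := by
  by_cases hj : j < l.length
  · rw [List.getD_eq_getElem _ _ (by simpa using hj), List.getD_eq_getElem _ _ hj]
    exact List.getElem_set_ne h _
  · rw [List.getD_eq_default _ _ (by simp; omega), List.getD_eq_default _ _ (by omega)]

theorem set_getD_self (l : List Int) (i : Nat) (h : i < l.length) :
    l.set i (l.getD i 0) = l := by
  rw [List.getD_eq_getElem _ _ h]; exact List.set_getElem_self h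

theorem getD_append_left (l1 l2 : List Int) (i : Nat) (h : i < l1.length) :
    (l1 ++ l2).getD i 0 = l1.getD i 0 := by
  rw [List.getD_eq_getElem _ _ (by simp; omega), List.getD_eq_getElem _ _ h]
  exact List.getElem_append_left h

-- additive count identity for List.set (no truncated subtraction)
theorem count_set_add (l : List Int) (i : Nat) (x a : Int) (h : i < l.length) :
    (l.set i x).count a + (if l.getD i 0 = a then 1 else 0)
      = l.count a + (if x = a then 1 else 0) := by
  induction l generalizing i with
  | nil => simp at h
  | cons b t ih =>
    cases i with
    | zero => simp [List.count_cons]; split_ifs <;> simp_all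
    | succ j =>
      have := ih j (by simpa using h)
      simp [List.count_cons] at *
      split_ifs at * <;> simp_all

theorem set_set_perm (l : List Int) (i j : Nat) (x : Int)
    (hi : i < l.length) (hj : j < l.length) (hne : i ≠ j) :
    ((l.set i (l.getD j 0)).set j x).Perm (l.set i x) := by
  rw [List.perm_iff_count]; intro a
  have h1 := count_set_add (l.set i (l.getD j 0)) j x a (by simpa using hj)
  have h2 := count_set_add l i (l.getD j 0) a hi
  have h3 := count_set_add l i x a hi
  rw [getD_set_ne _ i j _ hne] at h1
  split_ifs at h1 h2 h3 <;> omega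

theorem cons_head_set_zero_perm (rest : List Int) (v : Int) (h : rest ≠ []) :
    (rest.getD 0 0 :: rest.set 0 v).Perm (rest ++ [v]) := by
  obtain ⟨b, t, rfl⟩ : ∃ b t, rest = b :: t := by
    cases rest with | nil => simp_all | cons b t => exact ⟨b, t, rfl⟩
  simpa using ((List.perm_append_singleton v t).symm.cons b)

-- placing x at the hole p: the heap-edge property inside the region holds afterwards
theorem set_place_E (l : List Int) (s p : Nat) (x : Int) (hp : p < l.length)
    (SA : ∀ i, 0 < i → i < l.length → s ≤ (i - 1) / 2 → i ≠ p → (i - 1) / 2 ≠ p →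
          l.getD ((i - 1) / 2) 0 ≤ l.getD i 0)
    (SB1 : ∀ j, 0 < j → j < l.length → (j - 1) / 2 = p → x ≤ l.getD j 0)
    (hroot : s < p → l.getD ((p - 1) / 2) 0 ≤ x) :
    ∀ i, 0 < i → i < l.length → s ≤ (i - 1) / 2 →
      (l.set p x).getD ((i - 1) / 2) 0 ≤ (l.set p x).getD i 0 := by
  intro i h0 hil hsi
  by_cases hip : i = p
  · subst hip
    rw [getD_set_ne _ _ _ _ (by omega), getD_set_self _ _ _ hp]
    exact hroot (by omega)
  · by_cases hpp : (i - 1) / 2 = p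
    · rw [hpp, getD_set_self _ _ _ hp, getD_set_ne _ _ _ _ (by omega)]
      exact SB1 i h0 hil hpp
    · rw [getD_set_ne _ _ _ _ (by omega), getD_set_ne _ _ _ _ (by omega)]
      exact SA i h0 hil hsi hip hpp

theorem siftdownLoop_spec : ∀ (p : Nat) (l : List Int) (s : Nat) (x : Int),
    p < l.length → DescN s p →
    (∀ i, 0 < i → i < l.length → s ≤ (i - 1) / 2 → i ≠ p → (i - 1) / 2 ≠ p →
          l.getD ((i - 1) / 2) 0 ≤ l.getD i 0) →
    (∀ j, 0 < j → j < l.length → (j - 1) / 2 = p →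
          x ≤ l.getD j 0 ∧ (s < p → l.getD ((p - 1) / 2) 0 ≤ l.getD j 0)) →
    (siftdownLoop l s p x).Perm (l.set p x) ∧
    (∀ i, 0 < i → i < l.length → s ≤ (i - 1) / 2 →
      (siftdownLoop l s p x).getD ((i - 1) / 2) 0 ≤ (siftdownLoop l s p x).getD i 0) := by
  intro p
  induction p using Nat.strong_induction_on with
  | _ p ih =>
    intro l s x hp hd SA SB
    rw [siftdownLoop]
    by_cases h1 : s < p
    · rw [dif_pos h1]
      by_cases h2 : x < l.getD ((p - 1) / 2) 0
      · rw [if_pos h2]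
        have hppos : 0 < p := by omega
        have hq : (p - 1) / 2 < p := by omega
        have hqlen : (p - 1) / 2 < (l.set p (l.getD ((p - 1) / 2) 0)).length := by
          simp; omega
        have hdq : DescN s ((p - 1) / 2) := desc_parent hd (by omega)
        have hsq : s ≤ (p - 1) / 2 := parent_ge_start hd h1
        have SA' : ∀ i, 0 < i → i < (l.set p (l.getD ((p - 1) / 2) 0)).length →
            s ≤ (i - 1) / 2 → i ≠ (p - 1) / 2 → (i - 1) / 2 ≠ (p - 1) / 2 →
            (l.set p (l.getD ((p - 1) / 2) 0)).getD ((i - 1) / 2) 0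
              ≤ (l.set p (l.getD ((p - 1) / 2) 0)).getD i 0 := by
          intro i h0 hil hsi hiq hpq
          have hil' : i < l.length := by simpa using hil
          by_cases hip : i = p
          · exact absurd (by omega : (i - 1) / 2 = (p - 1) / 2) hpq
          · by_cases hpp : (i - 1) / 2 = p
            · rw [hpp, getD_set_self _ _ _ hp, getD_set_ne _ _ _ _ (by omega)]
              exact (SB i h0 hil' hpp).2 h1
            · rw [getD_set_ne _ _ _ _ (by omega), getD_set_ne _ _ _ _ (by omega)]
              exact SA i h0 hil' hsi hip hpp
        have SB' : ∀ j, 0 < j → j < (l.set p (l.getD ((p - 1) / 2) 0)).length →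
            (j - 1) / 2 = (p - 1) / 2 →
            x ≤ (l.set p (l.getD ((p - 1) / 2) 0)).getD j 0 ∧
            (s < (p - 1) / 2 →
              (l.set p (l.getD ((p - 1) / 2) 0)).getD (((p - 1) / 2 - 1) / 2) 0
                ≤ (l.set p (l.getD ((p - 1) / 2) 0)).getD j 0) := by
          intro j h0 hjl hjq
          have hjl' : j < l.length := by simpa using hjl
          have hgq : ∀ hq0 : s < (p - 1) / 2,
              l.getD (((p - 1) / 2 - 1) / 2) 0 ≤ l.getD ((p - 1) / 2) 0 := by
            intro hq0
            exact SA ((p - 1) / 2) (by omega) (by omega)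
              (parent_ge_start hdq hq0) (by omega) (by omega)
          by_cases hjp : j = p
          · subst hjp
            rw [getD_set_self _ _ _ hp]
            refine ⟨le_of_lt h2, fun hq0 => ?_⟩
            rw [getD_set_ne _ _ _ _ (by omega)]
            exact hgq hq0
          · rw [getD_set_ne _ _ _ _ (by omega)]
            have hedge : l.getD ((p - 1) / 2) 0 ≤ l.getD j 0 := by
              have := SA j h0 hjl' (by omega) hjp (by omega)
              rwa [hjq] at this
            refine ⟨le_trans (le_of_lt h2) hedge, fun hq0 => ?_⟩
            rw [getD_set_ne _ _ _ _ (by omega)]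
            exact le_trans (hgq hq0) hedge
        obtain ⟨hperm, hE⟩ := ih ((p - 1) / 2) hq (l.set p (l.getD ((p - 1) / 2) 0)) s x
          hqlen hdq SA' SB'
        constructor
        · exact hperm.trans (set_set_perm l p ((p - 1) / 2) x hp (by omega) (by omega))
        · intro i h0 hil hsi
          exact hE i h0 (by simpa using hil) hsi
      · rw [if_neg h2]
        refine ⟨List.Perm.refl _, set_place_E l s p x hp SA
          (fun j h0 hjl hjp => (SB j h0 hjl hjp).1) (fun _ => by omega)⟩
    · rw [dif_neg h1]
      refine ⟨List.Perm.refl _, set_place_E l s p x hp SA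
        (fun j h0 hjl hjp => (SB j h0 hjl hjp).1) (fun hc => absurd hc h1)⟩

theorem siftupLoop_spec : ∀ (m : Nat) (l : List Int) (s p : Nat) (x : Int),
    l.length - p ≤ m → p < l.length → DescN s p →
    (∀ i, 0 < i → i < l.length → s ≤ (i - 1) / 2 → i ≠ p → (i - 1) / 2 ≠ p →
          l.getD ((i - 1) / 2) 0 ≤ l.getD i 0) →
    (s < p → ∀ j, 0 < j → j < l.length → (j - 1) / 2 = p →
          l.getD ((p - 1) / 2) 0 ≤ l.getD j 0) →
    (siftupLoop l s p x).Perm (l.set p x) ∧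
    (∀ i, 0 < i → i < l.length → s ≤ (i - 1) / 2 →
      (siftupLoop l s p x).getD ((i - 1) / 2) 0 ≤ (siftupLoop l s p x).getD i 0) := by
  intro m
  induction m with
  | zero => intro l s p x hm hp; omega
  | succ m ihm =>
    intro l s p x hm hp hd U1 U2
    have hstep : ∀ c : Nat, (c = 2 * p + 1 ∨ c = 2 * p + 2) → c < l.length →
        (∀ j, 0 < j → j < l.length → (j - 1) / 2 = p → l.getD c 0 ≤ l.getD j 0) →
        (siftupLoop (l.set p (l.getD c 0)) s c x).Perm (l.set p x) ∧
        (∀ i, 0 < i → i < l.length → s ≤ (i - 1) / 2 →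
          (siftupLoop (l.set p (l.getD c 0)) s c x).getD ((i - 1) / 2) 0
            ≤ (siftupLoop (l.set p (l.getD c 0)) s c x).getD i 0) := by
      intro c hcp0 hclen hmin
      have hcp : (c - 1) / 2 = p := by omega
      have hpc : p < c := by omega
      have hd' : DescN s c := desc_child hd hcp
      have U1' : ∀ i, 0 < i → i < (l.set p (l.getD c 0)).length → s ≤ (i - 1) / 2 →
          i ≠ c → (i - 1) / 2 ≠ c →
          (l.set p (l.getD c 0)).getD ((i - 1) / 2) 0 ≤ (l.set p (l.getD c 0)).getD i 0 := by
        intro i h0 hil hsi hic hpc2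
        have hil' : i < l.length := by simpa using hil
        by_cases hip : i = p
        · subst hip
          rw [getD_set_ne _ _ _ _ (by omega), getD_set_self _ _ _ hp]
          exact U2 (by omega) c (by omega) hclen hcp
        · by_cases hpp : (i - 1) / 2 = p
          · rw [hpp, getD_set_self _ _ _ hp, getD_set_ne _ _ _ _ (by omega)]
            exact hmin i h0 hil' hpp
          · rw [getD_set_ne _ _ _ _ (by omega), getD_set_ne _ _ _ _ (by omega)]
            exact U1 i h0 hil' hsi hip hpp
      have U2' : s < c → ∀ j, 0 < j → j < (l.set p (l.getD c 0)).length → (j - 1) / 2 = c →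
          (l.set p (l.getD c 0)).getD ((c - 1) / 2) 0 ≤ (l.set p (l.getD c 0)).getD j 0 := by
        intro _ j h0 hjl hjc
        have hjl' : j < l.length := by simpa using hjl
        rw [hcp, getD_set_self _ _ _ hp, getD_set_ne _ _ _ _ (by omega)]
        have := U1 j h0 hjl' (by have := desc_ge hd; omega) (by omega) (by omega)
        rwa [hjc] at this
      obtain ⟨hperm, hE⟩ := ihm (l.set p (l.getD c 0)) s c x
        (by rw [List.length_set]; omega) (by simpa using hclen) hd' U1' U2'
      refine ⟨hperm.trans (set_set_perm l p c x hp hclen (by omega)), ?_⟩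
      intro i h0 hil hsi
      exact hE i h0 (by simpa using hil) hsi
    rw [siftupLoop]
    by_cases hc1 : 2 * p + 1 < l.length
    · rw [dif_pos hc1]
      by_cases h2 : 2 * p + 2 < l.length ∧ ¬ (l.getD (2 * p + 1) 0 < l.getD (2 * p + 2) 0)
      · rw [dif_pos h2]
        refine hstep (2 * p + 2) (Or.inr rfl) h2.1 ?_
        intro j h0 hjl hjp
        have : j = 2 * p + 1 ∨ j = 2 * p + 2 := by omega
        rcases this with rfl | rfl
        · exact le_of_not_gt h2.2
        · exact le_refl _
      · rw [dif_neg h2]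
        refine hstep (2 * p + 1) (Or.inl rfl) hc1 ?_
        intro j h0 hjl hjp
        have : j = 2 * p + 1 ∨ j = 2 * p + 2 := by omega
        rcases this with rfl | rfl
        · exact le_refl _
        · have := not_and.mp h2 hjl
          simp at this
          exact le_of_lt this
    · rw [dif_neg hc1, siftdown, getD_set_self _ _ _ hp]
      obtain ⟨hperm, hE⟩ := siftdownLoop_spec p (l.set p x) s x (by simpa using hp) hd
        (by
          intro i h0 hil hsi hip hpp
          have hil' : i < l.length := by simpa using hil
          rw [getD_set_ne _ _ _ _ (by omega), getD_set_ne _ _ _ _ (by omega)]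
          exact U1 i h0 hil' hsi hip hpp)
        (by intro j h0 hjl hjp; exfalso; simp at hjl; omega)
      refine ⟨hperm.trans (by rw [List.set_set]), ?_⟩
      intro i h0 hil hsi
      exact hE i h0 (by simpa using hil) hsi

theorem siftup_spec (l : List Int) (p : Nat) (hp : p < l.length)
    (H : ∀ i, 0 < i → i < l.length → p < (i - 1) / 2 →
         l.getD ((i - 1) / 2) 0 ≤ l.getD i 0) :
    (siftup l p).Perm l ∧
    (∀ i, 0 < i → i < l.length → p ≤ (i - 1) / 2 →
      (siftup l p).getD ((i - 1) / 2) 0 ≤ (siftup l p).getD i 0) := by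
  obtain ⟨hperm, hE⟩ := siftupLoop_spec l.length l p p (l.getD p 0)
    (by omega) hp (desc_self p)
    (by intro i h0 hil hsi hip hpp; exact H i h0 hil (by omega))
    (by omega)
  rw [set_getD_self _ _ hp] at hperm
  exact ⟨hperm, hE⟩

theorem heapifyLoop_spec : ∀ (k : Nat) (l : List Int), 2 * k ≤ l.length →
    (∀ j, 0 < j → j < l.length → k ≤ (j - 1) / 2 → l.getD ((j - 1) / 2) 0 ≤ l.getD j 0) →
    (heapifyLoop l k).Perm l ∧ IsHeap (heapifyLoop l k) := by
  intro k
  induction k with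
  | zero => exact fun l _ h => ⟨List.Perm.refl _, fun j h0 hj => h j h0 hj (by omega)⟩
  | succ k ih =>
    intro l hk hE
    have hklen : k < l.length := by omega
    obtain ⟨hperm1, hE1⟩ := siftup_spec l k hklen
      (fun j h0 hj hpar => hE j h0 hj (by omega))
    have hlen1 : (siftup l k).length = l.length := hperm1.length_eq
    obtain ⟨hperm2, hE2⟩ := ih (siftup l k) (by omega)
      (fun j h0 hj hpar => hE1 j h0 (by omega) hpar)
    exact ⟨hperm2.trans hperm1, hE2⟩

theorem heapify_spec (l : List Int) : (heapify l).Perm l ∧ IsHeap (heapify l) := by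
  refine heapifyLoop_spec (l.length / 2) l (by omega) ?_
  intro j h0 hj hpar
  omega

theorem getD_mem (l : List Int) (h : l ≠ []) : l.getD 0 0 ∈ l := by
  cases l with | nil => simp_all | cons a t => simp

theorem root_min_idx {h : List Int} (hh : IsHeap h) :
    ∀ i, i < h.length → h.getD 0 0 ≤ h.getD i 0 := by
  intro i
  induction i using Nat.strong_induction_on with
  | _ i ih =>
    intro hi
    cases Nat.eq_zero_or_pos i with
    | inl h0 => subst h0; exact le_refl _
    | inr h0 => exact le_trans (ih ((i - 1) / 2) (by omega) (by omega)) (hh i h0 hi)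

theorem root_min {h : List Int} (hh : IsHeap h) : ∀ x ∈ h, h.getD 0 0 ≤ x := by
  intro x hx
  obtain ⟨i, hi, rfl⟩ := List.mem_iff_getElem.mp hx
  rw [← List.getD_eq_getElem _ 0 hi]
  exact root_min_idx hh i hi

theorem heappush_spec {h : List Int} (x : Int) (hh : IsHeap h) :
    (heappush h x).Perm (x :: h) ∧ IsHeap (heappush h x) := by
  have hlen : h.length < (h ++ [x]).length := by simp
  have hnew : (h ++ [x]).getD h.length 0 = x := by
    rw [List.getD_eq_getElem _ _ hlen]
    exact List.getElem_concat_length rfl _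
  rw [heappush, siftdown, hnew]
  obtain ⟨hperm, hE⟩ := siftdownLoop_spec h.length (h ++ [x]) 0 x hlen (desc_zero _)
    (by
      intro i h0 hil hsi hip hpp
      have hi : i < h.length := by simp at hil; omega
      have hpi : (i - 1) / 2 < h.length := by omega
      rw [getD_append_left _ _ _ hi, getD_append_left _ _ _ hpi]
      exact hh i h0 hi)
    (by intro j h0 hjl hjp; exfalso; simp at hjl; omega)
  have hself : (h ++ [x]).set h.length x = h ++ [x] := by
    have := set_getD_self (h ++ [x]) h.length hlen
    rwa [hnew] at this
  rw [hself] at hperm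
  refine ⟨hperm.trans (List.perm_append_singleton x h), ?_⟩
  intro i h0 hi
  exact hE i h0 (by rw [hperm.length_eq] at hi; omega) (by omega)

theorem heappop_spec {h : List Int} (hne : h ≠ []) (hh : IsHeap h) :
    (heappop h).1 = h.getD 0 0 ∧ ((heappop h).1 :: (heappop h).2).Perm h ∧
      IsHeap (heappop h).2 := by
  have hlast : h.getLast? = some (h.getLast hne) := List.getLast?_eq_some_getLast hne
  have hsplit : h.dropLast ++ [h.getLast hne] = h := List.dropLast_append_getLast hne
  simp only [heappop, hlast]
  by_cases hr : h.dropLast = []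
  · rw [if_pos hr]
    obtain ⟨v, hv⟩ : ∃ v, h = [v] :=
      ⟨h.getLast hne, by rw [hr, List.nil_append] at hsplit; exact hsplit.symm⟩
    subst hv
    refine ⟨by simp, by simp, ?_⟩
    intro i h0 hi; simp at hi
  · rw [if_neg hr]
    have hrlen : 0 < h.dropLast.length := List.length_pos_iff.mpr hr
    have hrlen2 : h.dropLast.length + 1 = h.length := by
      rw [← hsplit]; simp
    have hEr : ∀ i, 0 < i → i < h.dropLast.length →
        h.dropLast.getD ((i - 1) / 2) 0 ≤ h.dropLast.getD i 0 := by
      intro i h0 hi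
      have h1 := hh i h0 (by omega)
      rw [← hsplit, getD_append_left _ _ _ hi, getD_append_left _ _ _ (by omega)] at h1
      exact h1
    obtain ⟨hperm, hE⟩ := siftup_spec (h.dropLast.set 0 (h.getLast hne)) 0
      (by simpa using hrlen)
      (by
        intro i h0 hil hpar
        have hil' : i < h.dropLast.length := by simpa using hil
        rw [getD_set_ne _ _ _ _ (by omega), getD_set_ne _ _ _ _ (by omega)]
        exact hEr i h0 hil')
    have hhead : h.dropLast.getD 0 0 = h.getD 0 0 := by
      conv_rhs => rw [← hsplit]
      rw [getD_append_left _ _ _ hrlen]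
    refine ⟨hhead, ?_, ?_⟩
    · refine ((hperm.cons (h.dropLast.getD 0 0)).trans
        ((cons_head_set_zero_perm h.dropLast (h.getLast hne) hr).trans ?_)).trans
        (List.Perm.refl h) |>.symm.symm
      rw [hsplit]
    · intro i h0 hi
      rw [hperm.length_eq] at hi
      exact hE i h0 (by simpa using hi) (by omega)

theorem mergeIn_cons (x : Int) (t : List Int) (s : Int) :
    mergeIn (x :: t) s = if x ≤ s then x :: mergeIn t s else s :: s :: x :: t := by
  by_cases h : x ≤ s <;> simp [mergeIn, mergePos, h]

theorem mergeIn_perm (rest : List Int) (s : Int) : (mergeIn rest s).Perm (s :: s :: rest) := by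
  induction rest with
  | nil => simp [mergeIn, mergePos]
  | cons x t ih =>
    rw [mergeIn_cons]
    split_ifs with hx
    · exact (ih.cons x).trans ((List.Perm.swap _ _ _).trans ((List.Perm.swap _ _ _).cons _))
    · exact List.Perm.refl _

theorem mergeIn_sorted {rest : List Int} (s : Int) (h : rest.Pairwise (· ≤ ·)) :
    (mergeIn rest s).Pairwise (· ≤ ·) := by
  induction rest with
  | nil => simp [mergeIn, mergePos]
  | cons x t ih =>
    rw [mergeIn_cons]
    rw [List.pairwise_cons] at h
    split_ifs with hx
    · rw [List.pairwise_cons]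
      refine ⟨fun y hy => ?_, ih h.2⟩
      have := (mergeIn_perm t s).mem_iff.mp hy
      simp at this
      rcases this with rfl | hy' <;> [exact hx; exact h.1 y hy']
    · have hsx : s ≤ x := le_of_lt (by omega)
      have hst : ∀ y ∈ t, s ≤ y := fun y hy => le_trans hsx (h.1 y hy)
      refine List.pairwise_cons.mpr ⟨?_, List.pairwise_cons.mpr ⟨?_,
        List.pairwise_cons.mpr ⟨h.1, h.2⟩⟩⟩
      · intro y hy
        rcases List.mem_cons.mp hy with rfl | hy'
        · exact le_refl _
        · rcases List.mem_cons.mp hy' with rfl | hy'' <;> [exact hsx; exact hst y hy'']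
      · intro y hy
        rcases List.mem_cons.mp hy with rfl | hy' <;> [exact hsx; exact hst y hy']

theorem heap_root_eq_sorted_head {h : List Int} {a : Int} {t : List Int}
    (hh : IsHeap h) (hperm : h.Perm (a :: t)) (hs : (a :: t).Pairwise (· ≤ ·)) :
    h.getD 0 0 = a := by
  have hne : h ≠ [] := by
    intro hnil; rw [hnil] at hperm; exact absurd hperm.length_eq (by simp)
  have hmem : h.getD 0 0 ∈ a :: t := hperm.subset (getD_mem h hne)
  rw [List.pairwise_cons] at hs
  refine le_antisymm (root_min hh a (hperm.symm.subset (by simp))) ?_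
  rcases List.mem_cons.mp hmem with heq | hmem'
  · exact le_of_eq heq.symm
  · exact hs.1 _ hmem'

theorem loop_perm : ∀ (n : Nat) (h sl : List Int), h.Perm sl → IsHeap h →
    sl.Pairwise (· ≤ ·) → (2 ≤ sl.length ∨ n = 0) →
    (solLoop n h).Perm (altLoop n sl) := by
  intro n
  induction n with
  | zero => intro h sl hperm _ _ _; exact hperm
  | succ n ih =>
    intro h sl hperm hh hs hlen
    obtain ⟨a, b, t, rfl⟩ : ∃ a b t, sl = a :: b :: t := by
      match sl, hlen with
      | a :: b :: t, _ => exact ⟨a, b, t, rfl⟩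
      | [], hlen | [a], hlen => simp at hlen
    have hne : h ≠ [] := by
      intro hnil; rw [hnil] at hperm; exact absurd hperm.length_eq (by simp)
    obtain ⟨hv1, hp1, hh1⟩ := heappop_spec hne hh
    have ha : (heappop h).1 = a := by rw [hv1]; exact heap_root_eq_sorted_head hh hperm hs
    have hperm1 : (heappop h).2.Perm (b :: t) := by
      have := hp1.trans hperm
      rw [ha] at this
      exact this.cons_inv
    have hne1 : (heappop h).2 ≠ [] := by
      intro hnil; rw [hnil] at hperm1; exact absurd hperm1.length_eq (by simp)
    have hs1 : (b :: t).Pairwise (· ≤ ·) := hs.of_cons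
    obtain ⟨hv2, hp2, hh2⟩ := heappop_spec hne1 hh1
    have hb : (heappop (heappop h).2).1 = b := by
      rw [hv2]; exact heap_root_eq_sorted_head hh1 hperm1 hs1
    have hperm2 : (heappop (heappop h).2).2.Perm t := by
      have := hp2.trans hperm1
      rw [hb] at this
      exact this.cons_inv
    obtain ⟨hpu1, hhu1⟩ := heappush_spec ((heappop h).1 + (heappop (heappop h).2).1) hh2
    obtain ⟨hpu2, hhu2⟩ := heappush_spec ((heappop h).1 + (heappop (heappop h).2).1) hhu1
    have hfinal : (heappush (heappush (heappop (heappop h).2).2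
        ((heappop h).1 + (heappop (heappop h).2).1))
        ((heappop h).1 + (heappop (heappop h).2).1)).Perm (mergeIn t (a + b)) := by
      refine (hpu2.trans ((hpu1.cons _).trans ?_)).trans (mergeIn_perm t (a + b)).symm
      rw [ha, hb]
      exact (hperm2.cons _).cons _
    have hlenm : 2 ≤ (mergeIn t (a + b)).length := by
      rw [(mergeIn_perm t (a + b)).length_eq]; simp
    exact ih _ _ hfinal hhu2 (mergeIn_sorted _ (hs1.of_cons)) (Or.inl hlenm)

-- ===== VERDICT (by name: the statement is the Claim_ definition above) =====
theorem solution_spec : Claim_equal_solution := by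
  intro ability number _ hpre
  unfold Spec_solution solution solution_alt
  obtain ⟨hhp, hhh⟩ := heapify_spec ability
  have hsp : (PySem.List.sorted ability (fun x => x) false).Perm ability :=
    PySem.List.sorted_perm ..
  have hpw : (PySem.List.sorted ability (fun x => x) false).Pairwise (· ≤ ·) :=
    PySem.List.sorted_pairwise ..
  have hperm : (heapify ability).Perm (PySem.List.sorted ability (fun x => x) false) :=
    hhp.trans hsp.symm
  have hlen : 2 ≤ (PySem.List.sorted ability (fun x => x) false).length ∨ number.toNat = 0 := by
    rcases hpre with hn | hl
    · exact Or.inr (Int.toNat_of_nonpos hn)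
    · exact Or.inl (by rw [PySem.List.length_sorted]; exact hl)
  exact (loop_perm number.toNat _ _ hperm hhh hpw hlen).sum_eq
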